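-- pv_equiv track=rewrite | github.com/doputer/algorithm | 백준/14606.py | dp
-- ===== SOURCE A (Python) =====
-- def dp(n):
--     if n == 1:
--         return 0
--
--     happy = 0
--
--     if n % 2 == 0:
--         a, b = n // 2, n // 2
--     else:
--         a, b = n // 2 + 1, n // 2
--
--     happy += a * b
--     happy += dp(a)
--     happy += dp(b)
--
--     return happy
-- ===== SOURCE B (Python) =====
-- def dp(n):
--     # closed form: total cost of splitting n down to 1s is n*(n-1)//2
--     return n * (n - 1) // 2
-- ===== Notes on version B (the rewrite author's own statement) =====
-- stated objective: faster
-- what changed: Replaces the recursive halving-and-summing with the closed form n*(n-1)//2.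
-- outside the precondition, e.g. on dp(0): A raises RecursionError, B returns 0
import Mathlib
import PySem

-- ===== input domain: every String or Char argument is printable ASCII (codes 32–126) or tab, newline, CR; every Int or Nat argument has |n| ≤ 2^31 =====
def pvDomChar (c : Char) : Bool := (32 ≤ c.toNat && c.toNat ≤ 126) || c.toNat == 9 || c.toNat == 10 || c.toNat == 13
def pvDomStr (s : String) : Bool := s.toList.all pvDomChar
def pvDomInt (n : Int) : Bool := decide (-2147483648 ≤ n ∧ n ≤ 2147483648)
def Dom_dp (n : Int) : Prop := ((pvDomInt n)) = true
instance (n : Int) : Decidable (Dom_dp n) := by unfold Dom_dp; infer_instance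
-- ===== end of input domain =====

-- B replaces A's recursive halving-and-summing by the closed form n*(n-1)//2 (asymptotically faster).

-- ===== PORT A =====
-- literal port of A's recursion; the fuel argument (n.toNat) only makes the
-- recursion structurally total and is large enough to never run out on Pre_dp
def dpAux : Nat → Int → Int
  | 0, _ => 0
  | fuel + 1, n =>
    if n = 1 then 0
    else
      let ab := if PySem.Int.mod n 2 = 0
        then (PySem.Int.floordiv n 2, PySem.Int.floordiv n 2)
        else (PySem.Int.floordiv n 2 + 1, PySem.Int.floordiv n 2)
      ab.1 * ab.2 + dpAux fuel ab.1 + dpAux fuel ab.2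

def dp (n : Int) : Int := dpAux n.toNat n

-- ===== PORT B =====
def dp_alt (n : Int) : Int := PySem.Int.floordiv (n * (n - 1)) 2

-- ===== PRECONDITION & SPEC =====
-- A recurses forever for n ≤ 0 (Python: RecursionError); Pre_ admits exactly the inputs A returns on.
def Pre_dp (n : Int) : Prop := 1 ≤ n
instance (n : Int) : Decidable (Pre_dp n) := by unfold Pre_dp; infer_instance
def pvWitness_dp : Int := 7
def Spec_dp (n : Int) (out : Int) : Prop := out = dp_alt n
instance (n : Int) (out : Int) : Decidable (Spec_dp n out) := by unfold Spec_dp; infer_instance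

-- ===== CLAIM (what is proved, stated in full; the proofs are below) =====
def Claim_equal_dp : Prop := ∀ (n : Int), Dom_dp n → Pre_dp n → Spec_dp n (dp n)

-- ===== LEMMAS AND PROOFS =====

lemma dpAux_closed (fuel : Nat) : ∀ n : Int, 1 ≤ n → n.toNat ≤ fuel →
    dpAux fuel n = n * (n - 1) / 2 := by
  induction fuel with
  | zero => intro n h1 h2; omega
  | succ f ih =>
    intro n h1 h2
    by_cases hn1 : n = 1
    · simp [dpAux, hn1]
    · have h2n : (2:Int) ≤ n := by omega
      have hfd : PySem.Int.floordiv n 2 = n / 2 :=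
        PySem.Int.floordiv_eq_ediv_of_pos (by omega)
      have hmd : PySem.Int.mod n 2 = n % 2 :=
        PySem.Int.mod_eq_emod_of_pos (by omega)
      simp only [dpAux, hn1, if_false, hfd, hmd]
      by_cases hpar : n % 2 = 0
      · have hb : (1:Int) ≤ n / 2 := by omega
        have hlt : (n / 2).toNat ≤ f := by omega
        simp only [hpar, if_true]
        rw [ih _ hb hlt]
        obtain ⟨k, rfl⟩ : ∃ k, n = 2 * k := ⟨n / 2, by omega⟩
        have hk : (2 * k) / 2 = k := by omega
        rw [hk]
        have h1' : (2*k) * (2*k - 1) / 2 = k * (2*k - 1) := by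
          rw [mul_assoc]
          exact Int.mul_ediv_cancel_left _ (by norm_num)
        rw [h1']
        have hke : k * (k - 1) / 2 * 2 = k * (k-1) := by
          have : (2:Int) ∣ k * (k - 1) := (Int.even_mul_pred_self k).two_dvd
          omega
        nlinarith [hke]
      · have ha : (1:Int) ≤ n / 2 + 1 := by omega
        have hb : (1:Int) ≤ n / 2 := by omega
        have hlta : (n / 2 + 1).toNat ≤ f := by omega
        have hltb : (n / 2).toNat ≤ f := by omega
        simp only [hpar, if_false]
        rw [ih _ ha hlta, ih _ hb hltb]
        obtain ⟨k, rfl⟩ : ∃ k, n = 2 * k + 1 := ⟨n / 2, by omega⟩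
        have hk : (2 * k + 1) / 2 = k := by omega
        rw [hk]
        have h1' : (2*k+1) * (2*k+1 - 1) / 2 = (2*k+1) * k := by
          have : (2*k+1) * (2*k+1-1) = ((2*k+1)*k) * 2 := by ring
          rw [this]; exact Int.mul_ediv_cancel _ (by norm_num)
        rw [h1']
        have he1 : (k+1) * (k+1-1) / 2 * 2 = (k+1)*(k+1-1) := by
          have : (2:Int) ∣ (k+1) * (k+1-1) := (Int.even_mul_pred_self (k+1)).two_dvd
          omega
        have he2 : k * (k - 1) / 2 * 2 = k * (k-1) := by
          have : (2:Int) ∣ k * (k - 1) := (Int.even_mul_pred_self k).two_dvd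
          omega
        nlinarith [he1, he2]

-- ===== VERDICT (by name: the statement is the Claim_ definition above) =====
theorem dp_spec : Claim_equal_dp := by
  intro n _ hpre
  unfold Spec_dp dp dp_alt
  rw [dpAux_closed n.toNat n hpre (le_refl _),
    PySem.Int.floordiv_eq_ediv_of_pos (by norm_num)]
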